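-- pv_equiv track=rewrite | github.com/cirosantilli/project-euler-solutions | solvers/878.py | collect_solutions_in_box
-- ===== SOURCE A (Python) =====
-- def clmul(x: int, y: int) -> int:
--     """
--     Carryless multiplication over GF(2).
--
--     If x = sum x_i 2^i and y = sum y_j 2^j (x_i,y_j in {0,1}),
--     then:
--         x ⊗ y = XOR over all i,j with x_i=y_j=1 of 2^(i+j)
--
--     Implementation: iterate over set bits of the sparser operand.
--     """
--     if x == 0 or y == 0:
--         return 0
--     # iterate over fewer set bits for speed
--     if x.bit_count() < y.bit_count():
--         x, y = y, x
--     res = 0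
--     while y:
--         lsb = y & -y
--         res ^= x << (lsb.bit_length() - 1)
--         y ^= lsb
--     return res
--
-- def box_size_for_m(m: int) -> int:
--     """
--     Empirically/theoretically, all solution-orbits for k <= m intersect
--     a small "fundamental box" whose side length is about 2^(deg(m)/2).
--
--     We take:
--       B = 2^(((bitlen(m)+1)//2) + 2)
--
--     For m=1_000_000 (bitlen=20) => B=2^12=4096.
--     """
--     return 1 << (((m.bit_length() + 1) // 2) + 2)
--
-- def collect_solutions_in_box(m: int) -> tuple[int, list[int], set[int]]:
--     """
--     Enumerate all (a,b) with 0 <= a,b < B that satisfy k(a,b) <= m.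
--
--     We enumerate only a<=b, but insert both orientations (a,b) and (b,a)
--     so orbit connectivity inside the box is preserved.
--
--     Returns:
--       B, precomputed squares sq[x]=x⊗x for x<B, and a set of encoded pairs.
--     """
--     B = box_size_for_m(m)
--
--     sq = [0] * B
--     for x in range(B):
--         sq[x] = clmul(x, x)
--
--     sols = set()
--     for a in range(B):
--         sa = sq[a]
--         for b in range(a, B):
--             k = sa ^ sq[b] ^ (clmul(a, b) << 1)
--             if k <= m:
--                 sols.add(a * B + b)
--                 if a != b:
--                     sols.add(b * B + a)
--
--     return B, sq, sols
-- ===== SOURCE B (Python) =====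
-- def collect_solutions_in_box(m: int) -> tuple[int, list[int], set[int]]:
--     """
--     Same result as A, without any carryless-multiplication subroutine:
--
--     * sq[x] = x (x) x is the GF(2) "bit spread" of x, so it satisfies
--       sq[x] = 4*sq[x >> 1] + (x % 2), a one-pass DP.
--     * Along the inner loop we keep p = clmul(a, b) and update it
--       incrementally: b -> b+1 flips exactly the low-ones mask
--       e = b ^ (b + 1), and clmul is GF(2)-linear in its second
--       argument, so p ^= clmul(a, e) = XOR of a << j over the bits of e.
--       The total update cost over a whole row is O(B), not O(B log B).
--     """
--     B = 1 << (((m.bit_length() + 1) // 2) + 2)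
--
--     sq = [0] * B
--     for x in range(1, B):
--         sq[x] = 4 * sq[x // 2] + x % 2
--
--     sols = set()
--     for a in range(B):
--         sa = sq[a]
--         p = sa  # p == clmul(a, b) for the current b; clmul(a, a) == sq[a]
--         for b in range(a, B):
--             k = sa ^ sq[b] ^ (2 * p)
--             if k <= m:
--                 sols.add(a * B + b)
--                 if a != b:
--                     sols.add(b * B + a)
--             # advance p to clmul(a, b + 1): xor in a << j for each set bit
--             # of the all-ones mask e = b ^ (b + 1)
--             e = b ^ (b + 1)
--             d = a
--             while e:
--                 p ^= d
--                 d *= 2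
--                 e //= 2
--     return B, sq, sols
-- ===== Notes on version B (the rewrite author's own statement) =====
-- stated objective: faster
-- what changed: B drops the clmul subroutine entirely: the squares table is filled by a one-pass bit-spread DP (each entry derived from the entry at half its index), and along each row the value clmul(a,b) is maintained incrementally across consecutive b by XOR-ing shifted copies of a over the flipped low-ones mask (clmul is GF(2)-linear), amortized O(1) word ops per pair, instead of recomputing clmul bit-by-bit for every pair.
import Mathlib
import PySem

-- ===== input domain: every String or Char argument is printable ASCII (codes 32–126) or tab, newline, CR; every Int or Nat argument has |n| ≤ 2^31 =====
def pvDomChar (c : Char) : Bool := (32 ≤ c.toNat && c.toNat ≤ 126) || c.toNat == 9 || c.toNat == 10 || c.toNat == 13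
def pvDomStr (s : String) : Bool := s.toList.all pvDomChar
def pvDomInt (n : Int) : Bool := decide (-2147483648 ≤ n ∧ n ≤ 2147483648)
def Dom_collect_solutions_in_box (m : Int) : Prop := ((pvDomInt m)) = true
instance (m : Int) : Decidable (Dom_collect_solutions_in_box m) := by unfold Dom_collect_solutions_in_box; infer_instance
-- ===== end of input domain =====

-- B replaces A's per-pair carryless multiplication by a one-pass DP for the squares and an
-- incremental GF(2)-linear update of clmul(a,b) along each row (objective: faster, constant-factor).

-- ===== PORT A =====
-- while-loop of clmul: fuel-guarded (fuel y.toNat suffices: y strictly decreases; the guard only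
-- totalizes the off-domain case y < 0, where the Python loop does not terminate)
def clmulLoop : Nat → Int → Int → Int → Int
  | 0, _, res, _ => res
  | f + 1, x, res, y =>
    if y = 0 then res
    else
      let lsb := PySem.Int.band y (-y)
      clmulLoop f x (PySem.Int.bxor res (x <<< (PySem.Int.bitLength lsb - 1))) (PySem.Int.bxor y lsb)

def clmul (x y : Int) : Int :=
  if x = 0 ∨ y = 0 then 0
  else
    let p := if PySem.Int.bitCount x < PySem.Int.bitCount y then (y, x) else (x, y)
    clmulLoop p.2.toNat p.1 0 p.2

def box_size_for_m (m : Int) : Int :=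
  1 <<< ((PySem.Int.bitLength m + 1) / 2 + 2)

def collect_solutions_in_box (m : Int) : Int × List Int × List Int :=
  let B : Int := box_size_for_m m
  let sq : List Int := (PySem.List.pyRange 0 B 1).foldl
      (fun sq x => PySem.List.pySetD sq x (clmul x x)) (List.replicate B.toNat 0)
  let sols : PySem.Set Int := (PySem.List.pyRange 0 B 1).foldl (fun sols a =>
      let sa := PySem.List.pyGetD sq a 0
      (PySem.List.pyRange a B 1).foldl (fun sols b =>
        let k := PySem.Int.bxor (PySem.Int.bxor sa (PySem.List.pyGetD sq b 0)) (clmul a b <<< (1:Nat))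
        if k ≤ m then
          let sols := PySem.Set.add sols (a * B + b)
          if a ≠ b then PySem.Set.add sols (b * B + a) else sols
        else sols) sols) PySem.Set.empty
  (B, sq, sols)

-- ===== PORT B =====
-- inner 'while e:' loop of Source B (fuel e.toNat suffices: e is halved each step)
def eLoop : Nat → Int → Int → Int → Int
  | 0, p, _, _ => p
  | f + 1, p, d, e =>
    if e = 0 then p
    else eLoop f (PySem.Int.bxor p d) (2 * d) (PySem.Int.floordiv e 2)

def collect_solutions_in_box_alt (m : Int) : Int × List Int × List Int :=
  let B : Int := 1 <<< ((PySem.Int.bitLength m + 1) / 2 + 2)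
  let sq : List Int := (PySem.List.pyRange 1 B 1).foldl
      (fun sq x => PySem.List.pySetD sq x
        (4 * PySem.List.pyGetD sq (PySem.Int.floordiv x 2) 0 + PySem.Int.mod x 2))
      (List.replicate B.toNat 0)
  let sols : PySem.Set Int := (PySem.List.pyRange 0 B 1).foldl (fun sols a =>
      let sa := PySem.List.pyGetD sq a 0
      ((PySem.List.pyRange a B 1).foldl (fun (st : PySem.Set Int × Int) b =>
        let k := PySem.Int.bxor (PySem.Int.bxor sa (PySem.List.pyGetD sq b 0)) (2 * st.2)
        let sols' := if k ≤ m then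
            let s1 := PySem.Set.add st.1 (a * B + b)
            if a ≠ b then PySem.Set.add s1 (b * B + a) else s1
          else st.1
        let e := PySem.Int.bxor b (b + 1)
        (sols', eLoop e.toNat st.2 a e)) (sols, sa)).1) PySem.Set.empty
  (B, sq, sols)

-- ===== PRECONDITION & SPEC =====
def Spec_collect_solutions_in_box (m : Int) (out : Int × List Int × List Int) : Prop := out = collect_solutions_in_box_alt m
instance (m : Int) (out : Int × List Int × List Int) : Decidable (Spec_collect_solutions_in_box m out) := by unfold Spec_collect_solutions_in_box; infer_instance

-- ===== CLAIM (what is proved, stated in full; the proofs are below) =====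
def Claim_equal_collect_solutions_in_box : Prop := ∀ (m : Int), Dom_collect_solutions_in_box m → Spec_collect_solutions_in_box m (collect_solutions_in_box m)

-- ===== LEMMAS AND PROOFS =====

-- carryless product, recursion on first argument
def cmN (x y : Nat) : Nat :=
  if _h : x = 0 then 0
  else 2 * cmN (x / 2) y ^^^ (if x % 2 = 1 then y else 0)
decreasing_by exact Nat.div_lt_self (Nat.pos_of_ne_zero _h) one_lt_two

theorem bit_eq (b : Bool) (n : Nat) : Nat.bit b n = 2*n + (if b then 1 else 0) := by
  cases b <;> simp [Nat.bit]

theorem two_mul_xor (a b : Nat) : 2*a ^^^ 2*b = 2*(a ^^^ b) := by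
  have := Nat.xor_bit false a false b
  simpa [bit_eq] using this

theorem xor_low (a b r s : Nat) (hr : r < 2) (hs : s < 2) :
    (2*a + r) ^^^ (2*b + s) = 2*(a ^^^ b) + (r ^^^ s) := by
  have h1 : r = 0 ∨ r = 1 := by omega
  have h2 : s = 0 ∨ s = 1 := by omega
  rcases h1 with h | h <;> rcases h2 with h' | h' <;> subst h <;> subst h'
  · simpa [bit_eq] using Nat.xor_bit false a false b
  · simpa [bit_eq] using Nat.xor_bit false a true b
  · simpa [bit_eq] using Nat.xor_bit true a false b
  · simpa [bit_eq] using Nat.xor_bit true a true b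

theorem land_low (a b r s : Nat) (hr : r < 2) (hs : s < 2) :
    (2*a + r) &&& (2*b + s) = 2*(a &&& b) + (r &&& s) := by
  have h1 : r = 0 ∨ r = 1 := by omega
  have h2 : s = 0 ∨ s = 1 := by omega
  rcases h1 with h | h <;> rcases h2 with h' | h' <;> subst h <;> subst h'
  · simpa [bit_eq] using Nat.land_bit false a false b
  · simpa [bit_eq] using Nat.land_bit false a true b
  · simpa [bit_eq] using Nat.land_bit true a false b
  · simpa [bit_eq] using Nat.land_bit true a true b

theorem cmN_zero_left (y : Nat) : cmN 0 y = 0 := by rw [cmN]; simp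

theorem cmN_zero_right (x : Nat) : cmN x 0 = 0 := by
  induction x using Nat.strong_induction_on with
  | _ x ih =>
    rw [cmN]
    split
    · rfl
    · rename_i h
      rw [ih (x/2) (Nat.div_lt_self (Nat.pos_of_ne_zero h) one_lt_two)]
      simp

theorem cmN_two_mul_left (a y : Nat) : cmN (2*a) y = 2 * cmN a y := by
  rcases Nat.eq_zero_or_pos a with h | h
  · subst h; simp [cmN_zero_left]
  · rw [cmN]
    have h2 : ¬ (2*a = 0) := by omega
    simp only [h2]
    have : 2*a/2 = a := by omega
    rw [this]
    have : 2*a % 2 = 0 := by omega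
    simp [this]

theorem cmN_odd_left (a y : Nat) : cmN (2*a+1) y = 2 * cmN a y ^^^ y := by
  rw [cmN]
  have h2 : ¬ (2*a+1 = 0) := by omega
  simp only [h2]
  have : (2*a+1)/2 = a := by omega
  rw [this]
  have : (2*a+1) % 2 = 1 := by omega
  simp [this]

theorem cmN_one_left (y : Nat) : cmN 1 y = y := by
  have := cmN_odd_left 0 y
  simpa [cmN_zero_left] using this

theorem cmN_xor_right (x y z : Nat) : cmN x (y ^^^ z) = cmN x y ^^^ cmN x z := by
  induction x using Nat.strong_induction_on with
  | _ x ih =>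
    rcases Nat.eq_zero_or_pos x with h | h
    · subst h; simp [cmN_zero_left]
    · have hx : x = 2*(x/2) + x % 2 := by omega
      have hlt : x/2 < x := Nat.div_lt_self h one_lt_two
      rcases Nat.mod_two_eq_zero_or_one x with hm | hm
      · rw [hx, hm]
        simp only [Nat.add_zero]
        rw [cmN_two_mul_left, cmN_two_mul_left, cmN_two_mul_left, ih _ hlt, two_mul_xor]
      · rw [hx, hm]
        rw [cmN_odd_left, cmN_odd_left, cmN_odd_left, ih _ hlt, ← two_mul_xor]
        simp [Nat.xor_assoc, Nat.xor_comm, Nat.xor_left_comm]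

theorem cmN_two_mul_right (x y : Nat) : cmN x (2*y) = 2 * cmN x y := by
  induction x using Nat.strong_induction_on with
  | _ x ih =>
    rcases Nat.eq_zero_or_pos x with h | h
    · subst h; simp [cmN_zero_left]
    · have hx : x = 2*(x/2) + x % 2 := by omega
      have hlt : x/2 < x := Nat.div_lt_self h one_lt_two
      rcases Nat.mod_two_eq_zero_or_one x with hm | hm
      · rw [hx, hm]; simp only [Nat.add_zero]
        rw [cmN_two_mul_left, cmN_two_mul_left, ih _ hlt]
      · rw [hx, hm]
        rw [cmN_odd_left, cmN_odd_left, ih _ hlt, two_mul_xor]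

theorem cmN_one_right (x : Nat) : cmN x 1 = x := by
  induction x using Nat.strong_induction_on with
  | _ x ih =>
    rcases Nat.eq_zero_or_pos x with h | h
    · subst h; simp [cmN_zero_left]
    · have hx : x = 2*(x/2) + x % 2 := by omega
      have hlt : x/2 < x := Nat.div_lt_self h one_lt_two
      rcases Nat.mod_two_eq_zero_or_one x with hm | hm
      · rw [hx, hm]; simp only [Nat.add_zero]
        rw [cmN_two_mul_left, ih _ hlt]
      · rw [hx, hm, cmN_odd_left, ih _ hlt]
        have := xor_low (x/2) 0 0 1 (by omega) (by omega)
        simpa using this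

theorem cmN_comm (x y : Nat) : cmN x y = cmN y x := by
  induction x using Nat.strong_induction_on generalizing y with
  | _ x ih =>
    rcases Nat.eq_zero_or_pos x with h | h
    · subst h; simp [cmN_zero_left, cmN_zero_right]
    · have hx : x = 2*(x/2) + x % 2 := by omega
      have hlt : x/2 < x := Nat.div_lt_self h one_lt_two
      have hsplit : x = 2*(x/2) ^^^ x % 2 := by
        have := xor_low (x/2) 0 0 (x % 2) (by omega) (by omega)
        simp at this
        omega
      rcases Nat.mod_two_eq_zero_or_one x with hm | hm
      · conv_lhs => rw [hx, hm]
        conv_rhs => rw [hsplit, hm]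
        simp only [Nat.add_zero, Nat.xor_zero]
        rw [cmN_two_mul_left, cmN_two_mul_right, ih _ hlt]
      · conv_lhs => rw [hx, hm]
        conv_rhs => rw [hsplit, hm]
        rw [cmN_odd_left, cmN_xor_right, cmN_two_mul_right, cmN_one_right, ih _ hlt]

theorem cmN_xor_left (x y z : Nat) : cmN (x ^^^ y) z = cmN x z ^^^ cmN y z := by
  rw [cmN_comm, cmN_xor_right, cmN_comm z x, cmN_comm z y]

theorem cmN_pow2_left (j y : Nat) : cmN (2^j) y = 2^j * y := by
  induction j with
  | zero => simpa using cmN_one_left y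
  | succ j ih =>
    have : (2:Nat)^(j+1) = 2*2^j := by ring
    rw [this, cmN_two_mul_left, ih]; ring

theorem cmN_self_step (x : Nat) (_hx : 0 < x) :
    cmN x x = 4 * cmN (x/2) (x/2) + x % 2 := by
  have hsplit : x = 2*(x/2) ^^^ x % 2 := by
    have := xor_low (x/2) 0 0 (x % 2) (by omega) (by omega)
    simp at this
    omega
  conv_lhs => rw [hsplit]
  rw [cmN_xor_left, cmN_xor_right, cmN_xor_right]
  rw [cmN_two_mul_left, cmN_two_mul_right]
  rcases Nat.mod_two_eq_zero_or_one x with hm | hm <;> rw [hm]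
  · simp [cmN_zero_left, cmN_zero_right]; ring
  · rw [cmN_one_left, cmN_one_right, cmN_one_left]
    rw [Nat.xor_assoc, Nat.xor_xor_cancel_left]
    have := xor_low (2 * cmN (x/2) (x/2)) 0 0 1 (by omega) (by omega)
    simp only [Nat.add_zero, Nat.mul_zero, Nat.zero_add, Nat.xor_zero, Nat.zero_xor] at this
    rw [this]
    omega

-- E b = b ^^^ (b+1) is an all-ones mask
theorem xor_succ_allones (b : Nat) : ∃ t, b ^^^ (b+1) = 2^(t+1) - 1 := by
  induction b using Nat.strong_induction_on with
  | _ b ih =>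
    rcases Nat.mod_two_eq_zero_or_one b with hm | hm
    · obtain ⟨c, rfl⟩ : ∃ c, b = 2*c := ⟨b/2, by omega⟩
      refine ⟨0, ?_⟩
      have h1 : 2*c+1 = 2*c + 1 := rfl
      have := xor_low c c 0 1 (by omega) (by omega)
      simpa using this
    · obtain ⟨c, rfl⟩ : ∃ c, b = 2*c+1 := ⟨b/2, by omega⟩
      obtain ⟨t, ht⟩ := ih c (by omega)
      refine ⟨t+1, ?_⟩
      have h1 : 2*c+1+1 = 2*(c+1) + 0 := by omega
      rw [h1]
      have := xor_low c (c+1) 1 0 (by omega) (by omega)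
      rw [this, ht]
      have h2 : (2:Nat)^(t+1) ≥ 1 := Nat.one_le_two_pow
      have h3 : (2:Nat)^(t+1+1) = 2*2^(t+1) := by ring
      have h4 : (1:Nat) ^^^ 0 = 1 := by decide
      omega

theorem land_even_odd (a b : Nat) : (2*a) &&& (2*b+1) = 2*(a &&& b) := by
  simpa using land_low a b 0 1 (by omega) (by omega)

theorem land_odd_even (a b : Nat) : (2*a+1) &&& (2*b) = 2*(a &&& b) := by
  simpa using land_low a b 1 0 (by omega) (by omega)

theorem xor_odd_one (c : Nat) : (2*c+1) ^^^ 1 = 2*c := by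
  have := xor_low c 0 1 1 (by omega) (by omega)
  simp at this
  omega

-- lowest set bit via n &&& (n-1)
theorem lsbN (n : Nat) (h : 0 < n) :
    ∃ j, 2^j ≤ n ∧ n &&& (n-1) = n - 2^j ∧ n ^^^ 2^j = n - 2^j := by
  induction n using Nat.strong_induction_on with
  | _ n ih =>
    rcases Nat.mod_two_eq_zero_or_one n with hm | hm
    · obtain ⟨c, rfl⟩ : ∃ c, n = 2*c := ⟨n/2, by omega⟩
      have hc : 0 < c := by omega
      obtain ⟨j, hj1, hj2, hj3⟩ := ih c (by omega) hc
      have h6 : (2:Nat)^(j+1) = 2*2^j := by ring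
      refine ⟨j+1, by omega, ?_, ?_⟩
      · have h1 : 2*c - 1 = 2*(c-1) + 1 := by omega
        rw [h1, land_even_odd, hj2]
        omega
      · rw [h6, two_mul_xor, hj3]
        omega
    · obtain ⟨c, rfl⟩ : ∃ c, n = 2*c+1 := ⟨n/2, by omega⟩
      refine ⟨0, by omega, ?_, ?_⟩
      · have h1 : 2*c+1-1 = 2*c := by omega
        rw [h1, land_odd_even, Nat.and_self]
        omega
      · have h1 : (2:Nat)^0 = 1 := by decide
        rw [h1, xor_odd_one]
        omega

theorem bl_eq (n L : Nat) (h1 : 2^L ≤ n) (h2 : n < 2^(L+1)) :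
    PySem.Int.bitLength (n : Int) = L + 1 := by
  have hpos : 0 < n := lt_of_lt_of_le (Nat.two_pow_pos L) h1
  have hn : (n : Int) ≠ 0 := by exact_mod_cast Nat.pos_iff_ne_zero.mp hpos
  have hub := PySem.Int.lt_two_pow_bitLength (n : Int)
  have hlb := PySem.Int.two_pow_bitLength_le (n : Int) hn
  rw [Int.natAbs_natCast] at hub hlb
  set bl := PySem.Int.bitLength (n : Int) with hbl
  have e1 : L < bl := by
    by_contra hcon
    have : bl ≤ L := by omega
    have := Nat.pow_le_pow_right (by omega : 0 < 2) this
    omega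
  have e2 : bl - 1 < L + 1 := by
    by_contra hcon
    have : L + 1 ≤ bl - 1 := by omega
    have := Nat.pow_le_pow_right (by omega : 0 < 2) this
    omega
  omega

theorem intCast_shiftLeft (m k : Nat) : ((m : Int) <<< k) = ((m <<< k : Nat) : Int) := rfl

-- eLoop computes p ^^^ cmN (2^bitlen(e) - 1) d   (for nonnegative Nat-cast arguments)
theorem eLoop_spec (fuel : Nat) : ∀ (en p a : Nat), en ≤ fuel →
    eLoop fuel (p : Int) (a : Int) (en : Int) =
      ((p ^^^ cmN (2 ^ PySem.Int.bitLength (en : Int) - 1) a : Nat) : Int) := by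
  induction fuel with
  | zero =>
    intro en p a h
    have : en = 0 := by omega
    subst this
    simp [eLoop, PySem.Int.bitLength_zero, cmN_zero_left]
  | succ f ih =>
    intro en p a h
    rcases Nat.eq_zero_or_pos en with h0 | h0
    · subst h0
      simp [eLoop, PySem.Int.bitLength_zero, cmN_zero_left]
    · have hne : ((en : Int)) ≠ 0 := by exact_mod_cast Nat.pos_iff_ne_zero.mp h0
      rw [eLoop]
      simp only [hne, if_false]
      have hx : PySem.Int.bxor (p : Int) (a : Int) = ((p ^^^ a : Nat) : Int) :=
        PySem.Int.bxor_natCast p a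
      have hd : (2 : Int) * (a : Int) = ((2 * a : Nat) : Int) := by push_cast; ring
      have hfd : PySem.Int.floordiv (en : Int) 2 = ((en / 2 : Nat) : Int) := by
        exact_mod_cast PySem.Int.floordiv_natCast en 2
      rw [hx, hd, hfd, ih (en / 2) (p ^^^ a) (2 * a) (by omega)]
      have hbl : PySem.Int.bitLength (en : Int) = PySem.Int.bitLength ((en / 2 : Nat) : Int) + 1 :=
        PySem.Int.bitLength_natCast (m := en) h0
      set L := PySem.Int.bitLength ((en / 2 : Nat) : Int) with hL
      rw [hbl]
      congr 1
      rw [cmN_two_mul_right]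
      have hsplit : (2:Nat)^(L+1) - 1 = 2*(2^L - 1) + 1 := by
        have : (1:Nat) ≤ 2^L := Nat.one_le_two_pow
        have : (2:Nat)^(L+1) = 2*2^L := by ring
        omega
      rw [hsplit, cmN_odd_left]
      rw [Nat.xor_assoc]
      congr 1
      rw [Nat.xor_comm]

theorem band_pos_neg (n : Nat) (h : 0 < n) :
    PySem.Int.band (n : Int) (-(n : Int)) = ((n - (n &&& (n-1)) : Nat) : Int) := by
  have h1 : (0:Int) ≤ (n : Int) := by positivity
  have h2 : ¬ ((0:Int) ≤ -(n : Int)) := by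
    simp only [not_le]
    omega
  rw [PySem.Int.band]
  simp only [h1, h2, if_true, if_false]
  have h3 : (-(-(n:Int)) - 1).toNat = n - 1 := by omega
  have h4 : ((n:Int)).toNat = n := by omega
  rw [h3, h4]

theorem bl_pow (j : Nat) : PySem.Int.bitLength ((2^j : Nat) : Int) = j + 1 := by
  refine bl_eq _ j le_rfl ?_
  have : (2:Nat)^(j+1) = 2*2^j := by ring
  have := Nat.two_pow_pos j
  omega

theorem bl_ones (t : Nat) : PySem.Int.bitLength ((2^(t+1) - 1 : Nat) : Int) = t + 1 := by
  refine bl_eq _ t ?_ ?_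
  · have : (2:Nat)^(t+1) = 2*2^t := by ring
    have := Nat.two_pow_pos t
    omega
  · have := Nat.two_pow_pos (t+1)
    omega

theorem clmulLoop_spec (yn : Nat) : ∀ (fuel : Nat) (xn res : Nat), yn ≤ fuel →
    clmulLoop fuel (xn : Int) (res : Int) (yn : Int) = ((res ^^^ cmN yn xn : Nat) : Int) := by
  induction yn using Nat.strong_induction_on with
  | _ yn ih =>
    intro fuel xn res hle
    rcases Nat.eq_zero_or_pos yn with h0 | h0
    · subst h0
      cases fuel <;> simp [clmulLoop, cmN_zero_left]
    · obtain ⟨f, rfl⟩ : ∃ f, fuel = f + 1 := ⟨fuel - 1, by omega⟩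
      have hne : ((yn : Int)) ≠ 0 := by exact_mod_cast Nat.pos_iff_ne_zero.mp h0
      rw [clmulLoop]
      simp only [hne, if_false]
      obtain ⟨j, hj1, hj2, hj3⟩ := lsbN yn h0
      have hp : 0 < 2^j := Nat.two_pow_pos j
      have hlsb : PySem.Int.band (yn : Int) (-(yn : Int)) = ((2^j : Nat) : Int) := by
        rw [band_pos_neg yn h0, hj2]
        have : yn - (yn - 2^j) = 2^j := by omega
        rw [this]
      rw [hlsb, bl_pow]
      simp only [Nat.add_sub_cancel]
      rw [intCast_shiftLeft]
      have hres : PySem.Int.bxor (res : Int) ((xn <<< j : Nat) : Int) = ((res ^^^ xn <<< j : Nat) : Int) :=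
        PySem.Int.bxor_natCast _ _
      have hy : PySem.Int.bxor (yn : Int) ((2^j : Nat) : Int) = ((yn - 2^j : Nat) : Int) := by
        rw [PySem.Int.bxor_natCast, hj3]
      have hm1 : yn - 2^j < yn := by omega
      have hm2 : yn - 2^j ≤ f := by omega
      rw [hres, hy, ih (yn - 2^j) hm1 f (xn) (res ^^^ xn <<< j) hm2]
      congr 1
      have hyn : (yn - 2^j) ^^^ 2^j = yn := by
        rw [← hj3, Nat.xor_assoc, Nat.xor_self, Nat.xor_zero]
      conv_rhs => rw [← hyn]
      rw [cmN_xor_left, cmN_pow2_left, Nat.shiftLeft_eq]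
      rw [Nat.xor_assoc]
      congr 1
      rw [Nat.xor_comm, Nat.mul_comm]

theorem clmul_eq (a b : Nat) : clmul (a : Int) (b : Int) = ((cmN a b : Nat) : Int) := by
  rw [clmul]
  rcases Nat.eq_zero_or_pos a with ha | ha
  · subst ha; simp [cmN_zero_left]
  rcases Nat.eq_zero_or_pos b with hb | hb
  · subst hb; simp [cmN_zero_right]
  have hna : ((a : Int)) ≠ 0 := by exact_mod_cast Nat.pos_iff_ne_zero.mp ha
  have hnb : ((b : Int)) ≠ 0 := by exact_mod_cast Nat.pos_iff_ne_zero.mp hb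
  simp only [hna, hnb, if_false, or_self]
  split
  · have : ((a : Int)).toNat = a := by omega
    rw [this]
    have h0 : (0 : Int) = ((0 : Nat) : Int) := rfl
    rw [h0, clmulLoop_spec a a b 0 le_rfl]
    simp
  · have : ((b : Int)).toNat = b := by omega
    rw [this]
    have h0 : (0 : Int) = ((0 : Nat) : Int) := rfl
    rw [h0, clmulLoop_spec b b a 0 le_rfl]
    simp [cmN_comm b a]

theorem set_append_len {α : Type} (xs ys : List α) (v : α) :
    (xs ++ ys).set xs.length v = xs ++ ys.set 0 v := by
  induction xs with
  | nil => simp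
  | cons x xs ih => simp [ih]

theorem set_append_at {α : Type} (xs ys : List α) (v : α) (i : Nat) (h : i = xs.length) :
    (xs ++ ys).set i v = xs ++ ys.set 0 v := by
  subst h; exact set_append_len xs ys v

-- the common value table
def gcm (x : Nat) : Int := ((cmN x x : Nat) : Int)

theorem sqA_spec (n : Nat) (k : Nat) (hk : k ≤ n) :
    (PySem.List.pyRange 0 (k : Int) 1).foldl
      (fun sq x => PySem.List.pySetD sq x (clmul x x)) (List.replicate n (0:Int))
    = (List.range k).map gcm ++ List.replicate (n - k) 0 := by
  induction k with
  | zero => simp [PySem.List.pyRange_one_eq_nil]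
  | succ k ih =>
    have hcast : ((k+1 : Nat) : Int) = (k : Int) + 1 := by push_cast; ring
    rw [hcast, PySem.List.pyRange_one_succ_right (by positivity), List.foldl_append]
    rw [ih (by omega)]
    simp only [List.foldl_cons, List.foldl_nil]
    rw [clmul_eq, PySem.List.pySetD_natCast]
    have hlen : ((List.range k).map gcm).length = k := by simp
    rw [set_append_at _ _ _ k hlen.symm]
    obtain ⟨r, hr⟩ : ∃ r, n - k = r + 1 := ⟨n - k - 1, by omega⟩
    rw [hr, List.replicate_succ, List.set_cons_zero, List.range_succ, List.map_append]
    have : n - (k+1) = r := by omega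
    rw [this, List.append_assoc]
    rfl

theorem sqB_spec (n : Nat) (hn : 1 ≤ n) (k : Nat) (hk1 : 1 ≤ k) (hk : k ≤ n) :
    (PySem.List.pyRange 1 (k : Int) 1).foldl
      (fun sq x => PySem.List.pySetD sq x
        (4 * PySem.List.pyGetD sq (PySem.Int.floordiv x 2) 0 + PySem.Int.mod x 2))
      (List.replicate n (0:Int))
    = (List.range k).map gcm ++ List.replicate (n - k) 0 := by
  induction k with
  | zero => omega
  | succ k ih =>
    rcases Nat.eq_zero_or_pos k with h0 | h0
    · subst h0
      have h1 : ((0+1 : Nat) : Int) = 1 := by norm_num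
      rw [h1, PySem.List.pyRange_one_eq_nil le_rfl, List.foldl_nil]
      obtain ⟨r, hr⟩ : ∃ r, n = r + 1 := ⟨n - 1, by omega⟩
      subst hr
      simp [List.replicate_succ, gcm, cmN_zero_left]
    · have hcast : ((k+1 : Nat) : Int) = (k : Int) + 1 := by push_cast; ring
      rw [hcast, PySem.List.pyRange_one_succ_right (by exact_mod_cast h0), List.foldl_append]
      rw [ih h0 (by omega)]
      simp only [List.foldl_cons, List.foldl_nil]
      have hfd : PySem.Int.floordiv (k : Int) 2 = ((k / 2 : Nat) : Int) := by
        exact_mod_cast PySem.Int.floordiv_natCast k 2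
      have hmd : PySem.Int.mod (k : Int) 2 = ((k % 2 : Nat) : Int) := by
        exact_mod_cast PySem.Int.mod_natCast k 2
      rw [hfd, hmd, PySem.List.pyGetD_natCast, PySem.List.pySetD_natCast]
      have hget : ((List.range k).map gcm ++ List.replicate (n - k) 0).getD (k/2) 0 = gcm (k/2) := by
        rw [List.getD_append]
        · exact PySem.List.getD_map_range gcm k (k/2) 0 (by omega)
        · simp; omega
      rw [hget]
      have hval : 4 * gcm (k/2) + ((k % 2 : Nat) : Int) = gcm k := by
        unfold gcm
        rw [cmN_self_step k h0]
        push_cast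
        ring
      rw [hval]
      have hlen : ((List.range k).map gcm).length = k := by simp
      rw [set_append_at _ _ _ k hlen.symm]
      obtain ⟨r, hr⟩ : ∃ r, n - k = r + 1 := ⟨n - k - 1, by omega⟩
      rw [hr, List.replicate_succ, List.set_cons_zero, List.range_succ, List.map_append]
      have : n - (k+1) = r := by omega
      rw [this, List.append_assoc]
      rfl

theorem eStep (an bn : Nat) :
    eLoop (PySem.Int.bxor (bn : Int) ((bn : Int) + 1)).toNat ((cmN an bn : Nat) : Int) (an : Int)
        (PySem.Int.bxor (bn : Int) ((bn : Int) + 1))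
      = ((cmN an (bn+1) : Nat) : Int) := by
  have hc : ((bn : Int) + 1) = ((bn + 1 : Nat) : Int) := by push_cast; ring
  rw [hc, PySem.Int.bxor_natCast]
  obtain ⟨t, ht⟩ := xor_succ_allones bn
  rw [ht, Int.toNat_natCast, eLoop_spec _ _ _ _ le_rfl, bl_ones]
  rw [← ht]
  congr 1
  rw [cmN_comm (bn ^^^ (bn+1)) an, ← cmN_xor_right, Nat.xor_xor_cancel_left]

theorem inner_spec (m sa : Int) (Bn an : Nat) :
    ∀ (d bn : Nat), Bn - bn = d → ∀ (sols : PySem.Set Int),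
    ((PySem.List.pyRange (bn : Int) (Bn : Int) 1).foldl
       (fun (st : PySem.Set Int × Int) b =>
         (if PySem.Int.bxor (PySem.Int.bxor sa (PySem.List.pyGetD ((List.range Bn).map gcm) b 0)) (2 * st.2) ≤ m then
            (if (an : Int) ≠ b then
              PySem.Set.add (PySem.Set.add st.1 ((an : Int) * (Bn : Int) + b)) (b * (Bn : Int) + (an : Int))
             else PySem.Set.add st.1 ((an : Int) * (Bn : Int) + b))
          else st.1,
          eLoop (PySem.Int.bxor b (b + 1)).toNat st.2 (an : Int) (PySem.Int.bxor b (b + 1))))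
       (sols, ((cmN an bn : Nat) : Int))).1
    = (PySem.List.pyRange (bn : Int) (Bn : Int) 1).foldl
       (fun sols b =>
         if PySem.Int.bxor (PySem.Int.bxor sa (PySem.List.pyGetD ((List.range Bn).map gcm) b 0)) (clmul (an : Int) b <<< (1:Nat)) ≤ m then
           (if (an : Int) ≠ b then
             PySem.Set.add (PySem.Set.add sols ((an : Int) * (Bn : Int) + b)) (b * (Bn : Int) + (an : Int))
            else PySem.Set.add sols ((an : Int) * (Bn : Int) + b))
         else sols) sols := by
  intro d
  induction d with
  | zero =>
    intro bn hd sols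
    have hnil : PySem.List.pyRange (bn : Int) (Bn : Int) 1 = [] :=
      PySem.List.pyRange_one_eq_nil (by exact_mod_cast Nat.le_of_sub_eq_zero hd)
    rw [hnil]
    rfl
  | succ d ih =>
    intro bn hd sols
    have hlt : (bn : Int) < (Bn : Int) := by exact_mod_cast (by omega : bn < Bn)
    rw [PySem.List.pyRange_one_cons hlt]
    rw [List.foldl_cons, List.foldl_cons]
    dsimp only
    have hk : (2 : Int) * ((cmN an bn : Nat) : Int) = clmul (an : Int) (bn : Int) <<< (1:Nat) := by
      rw [clmul_eq, intCast_shiftLeft, Nat.shiftLeft_eq]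
      push_cast
      ring
    rw [hk, eStep an bn]
    have hc : ((bn : Int) + 1) = ((bn + 1 : Nat) : Int) := by push_cast; ring
    rw [hc]
    exact ih (bn + 1) (by omega) _

theorem gcm_def (x : Nat) : gcm x = ((cmN x x : Nat) : Int) := rfl

theorem ports_eq (m : Int) : collect_solutions_in_box m = collect_solutions_in_box_alt m := by
  unfold collect_solutions_in_box collect_solutions_in_box_alt box_size_for_m
  dsimp only
  set s : Nat := (PySem.Int.bitLength m + 1) / 2 + 2
  rw [Nat.one_shiftLeft s, Int.toNat_natCast]
  have hpos : 1 ≤ 2^s := Nat.one_le_two_pow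
  rw [sqA_spec (2^s) (2^s) le_rfl, sqB_spec (2^s) hpos (2^s) hpos le_rfl]
  simp only [Nat.sub_self, List.replicate_zero, List.append_nil]
  refine congrArg _ (congrArg _ ?_)
  refine PySem.List.foldl_congr_mem _ _ _ _ ?_
  intro acc x hx
  rw [PySem.List.mem_pyRange_one] at hx
  obtain ⟨an, rfl⟩ : ∃ an : Nat, x = (an : Int) := ⟨x.toNat, by omega⟩
  have han : an < 2^s := by exact_mod_cast hx.2
  have hsa : PySem.List.pyGetD ((List.range (2^s)).map gcm) ((an : Nat) : Int) 0 = gcm an := by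
    rw [PySem.List.pyGetD_natCast]
    exact PySem.List.getD_map_range gcm (2^s) an 0 han
  rw [hsa, gcm_def]
  exact (inner_spec m (gcm an) (2^s) an (2^s - an) an rfl acc).symm

-- ===== VERDICT (by name: the statement is the Claim_ definition above) =====
theorem collect_solutions_in_box_spec : Claim_equal_collect_solutions_in_box := by
  intro m _
  unfold Spec_collect_solutions_in_box
  exact ports_eq m
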